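-- pv_equiv track=rewrite | github.com/monizyzz/University | 2-year/Algorithmic Laboratory II/Dynamic_programming/espaca.py | contencao
-- ===== SOURCE A (Python) =====
-- def init(palavras):
--     res = {}
--     for pal in palavras:
--         res[pal] = set()
--     return res
--
-- def removeSets(dic):
--     r = {}
--     for p in dic:
--         if dic[p] != set():
--             r[p] = dic[p]
--     return r
--
-- def contencao(palavras):
--     res = init(palavras)
--     for main in palavras: #palavra a criar dicionario
--         for pal in palavras:
--             if pal != main:
--                 #Lógica importante
--                 mainLen = len(main)
--                 counter = 0
--                 for i in range(min(mainLen,len(pal))):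
--                     if pal[i] == main[i]:
--                         counter += 1
--                 if counter == mainLen:
--                     res[main].add(pal)
--     return removeSets(res)
-- ===== SOURCE B (Python) =====
-- def contencao(palavras):
--     # For each distinct word, enumerate its own proper prefixes and look them up
--     # in a hash set of the words, instead of comparing every pair of words.
--     distinct = list(dict.fromkeys(palavras))
--     wordset = set(distinct)
--     contains = {w: [] for w in distinct}
--     for pal in distinct:
--         for k in range(len(pal)):
--             pref = pal[:k]
--             if pref in wordset:
--                 contains[pref].append(pal)
--     return {w: set(l) for w, l in contains.items() if l}
-- ===== Notes on version B (the rewrite author's own statement) =====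
-- stated objective: faster
-- what changed: Instead of comparing every pair of words character by character (dict of sets plus a removal pass), B deduplicates once and, for each word, enumerates its own proper prefixes and looks each up in a hash set of the words, collecting containments in one pass.
import Mathlib
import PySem

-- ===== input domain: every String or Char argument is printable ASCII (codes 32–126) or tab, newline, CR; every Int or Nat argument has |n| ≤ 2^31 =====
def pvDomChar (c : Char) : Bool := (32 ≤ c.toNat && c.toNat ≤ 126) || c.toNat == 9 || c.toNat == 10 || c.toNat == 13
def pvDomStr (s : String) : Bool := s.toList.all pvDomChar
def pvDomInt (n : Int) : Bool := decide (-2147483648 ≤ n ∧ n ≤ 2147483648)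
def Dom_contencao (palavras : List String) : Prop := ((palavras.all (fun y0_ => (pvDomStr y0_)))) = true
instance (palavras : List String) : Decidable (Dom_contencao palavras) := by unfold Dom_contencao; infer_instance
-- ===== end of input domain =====

-- B replaces A's all-pairs character-counting scan (dict of sets plus a removal pass) by one pass
-- that deduplicates the words once and looks each word's own proper prefixes up in a set of the words.

-- ===== PORT A =====
def pvInit (palavras : List String) : PySem.Dict String (PySem.Set String) :=
  palavras.foldl (fun res pal => res.insert pal PySem.Set.empty) PySem.Dict.empty

def pvRemoveSets (dic : PySem.Dict String (PySem.Set String)) : PySem.Dict String (PySem.Set String) :=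
  dic.keys.foldl (fun r p =>
    if !(PySem.Set.equal (dic.getD p PySem.Set.empty) PySem.Set.empty) then
      r.insert p (dic.getD p PySem.Set.empty)
    else r) PySem.Dict.empty

def contencao (palavras : List String) : List (String × List String) :=
  let res0 := pvInit palavras
  let res := palavras.foldl (fun res main =>
    palavras.foldl (fun res pal =>
      if pal ≠ main then
        let mainLen : Int := PySem.Str.len main
        let counter : Int :=
          (PySem.List.pyRange 0 (min mainLen (PySem.Str.len pal)) 1).foldl
            (fun counter i =>
              if PySem.Str.pyGet? pal i == PySem.Str.pyGet? main i then counter + 1 else counter) 0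
        if counter == mainLen then res.modify main PySem.Set.empty (fun s => PySem.Set.add s pal)
        else res
      else res) res) res0
  (pvRemoveSets res).items

-- ===== PORT B =====
def contencao_alt (palavras : List String) : List (String × List String) :=
  let distinct := PySem.List.dedup palavras
  let wordset : PySem.Set String := PySem.Set.ofList distinct
  let contains0 : PySem.Dict String (List String) :=
    distinct.foldl (fun d w => d.insert w []) PySem.Dict.empty
  let contains1 := distinct.foldl (fun d pal =>
    (PySem.List.pyRange 0 (PySem.Str.len pal) 1).foldl (fun d k =>
      let pref := PySem.Str.slice pal (some 0) (some k)
      if PySem.Set.contains wordset pref then d.modify pref [] (fun l => l ++ [pal])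
      else d) d) contains0
  (contains1.items.foldl (fun r wl =>
      if wl.2 ≠ [] then r.insert wl.1 (PySem.Set.ofList wl.2) else r)
    (PySem.Dict.empty : PySem.Dict String (PySem.Set String))).items

-- ===== PRECONDITION & SPEC =====
def Spec_contencao (palavras : List String) (out : List (String × List String)) : Prop := out = contencao_alt palavras
instance (palavras : List String) (out : List (String × List String)) : Decidable (Spec_contencao palavras out) := by unfold Spec_contencao; infer_instance

-- ===== CLAIM (what is proved, stated in full; the proofs are below) =====
def Claim_equal_contencao : Prop := ∀ (palavras : List String), Dom_contencao palavras → Spec_contencao palavras (contencao palavras)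

-- ===== LEMMAS AND PROOFS =====

-- The Boolean "pal is a strictly longer extension of m" test both ports are reduced to.
def pvCond (m p : String) : Bool := decide (m.toList <+: p.toList) && decide (p ≠ m)

-- The words of `palavras` (first occurrences, in order) that strictly extend `m`.
def pvSpecL (palavras : List String) (m : String) : List String :=
  (PySem.List.dedup palavras).filter (pvCond m)

-- The common normal form of both ports.
def pvCommon (palavras : List String) : List (String × List String) :=
  ((PySem.List.dedup palavras).filter (fun w => decide (pvSpecL palavras w ≠ []))).map
    (fun w => (w, pvSpecL palavras w))

theorem pv_equal_nil_iff (v : PySem.Set String) :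
    (PySem.Set.equal v PySem.Set.empty = true) ↔ v = [] := by
  simp [PySem.Set.equal, PySem.Set.issubset, PySem.Set.empty, PySem.Set.contains,
    List.eq_nil_iff_forall_not_mem]

theorem pv_not_equal_nil (v : PySem.Set String) :
    (!(PySem.Set.equal v PySem.Set.empty)) = decide (v ≠ []) := by
  cases hEq : PySem.Set.equal v PySem.Set.empty with
  | true => simp [(pv_equal_nil_iff v).1 hEq]
  | false =>
      have : v ≠ [] := fun h => by rw [(pv_equal_nil_iff v).2 h] at hEq; cases hEq
      simp [this]

theorem pv_add_of_mem (s : PySem.Set String) (x : String) (h : x ∈ s) :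
    PySem.Set.add s x = s := by
  simp [PySem.Set.add, PySem.Set.contains, h]

theorem pv_foldl_add_absorb :
    ∀ (l : List String) (s : PySem.Set String), (∀ x ∈ l, x ∈ s) →
      l.foldl PySem.Set.add s = s := by
  intro l
  induction l with
  | nil => intro s _; rfl
  | cons x t ih =>
      intro s h
      simp only [List.foldl_cons]
      rw [pv_add_of_mem s x (h x (by simp))]
      exact ih s (fun y hy => h y (by simp [hy]))

theorem pv_filter_add (q : String → Bool) (s : PySem.Set String) (x : String) :
    (PySem.Set.add s x).filter q = if q x then PySem.Set.add (s.filter q) x else s.filter q := by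
  by_cases hm : x ∈ s
  · rw [pv_add_of_mem s x hm]
    by_cases hq : q x = true
    · rw [if_pos hq, pv_add_of_mem _ x (List.mem_filter.2 ⟨hm, hq⟩)]
    · rw [if_neg hq]
  · have hc : PySem.Set.add s x = s ++ [x] := by
      simp only [PySem.Set.add, PySem.Set.contains]
      rw [if_neg]
      simp only [List.contains_eq_mem, decide_eq_true_eq]
      exact hm
    rw [hc, List.filter_append]
    by_cases hq : q x = true
    · have hx' : x ∉ s.filter q := fun h => hm (List.mem_filter.1 h).1
      rw [if_pos hq]
      have h2 : PySem.Set.add (s.filter q) x = s.filter q ++ [x] := by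
        simp only [PySem.Set.add, PySem.Set.contains]
        rw [if_neg]
        simp only [List.contains_eq_mem, decide_eq_true_eq]
        exact hx'
      rw [h2]
      simp [hq]
    · rw [if_neg hq]
      simp [hq]

theorem pv_foldl_add_filter (q : String → Bool) :
    ∀ (l : List String) (s : PySem.Set String),
      (l.filter q).foldl PySem.Set.add (s.filter q) = (l.foldl PySem.Set.add s).filter q := by
  intro l
  induction l with
  | nil => intro s; rfl
  | cons x t ih =>
      intro s
      rw [List.filter_cons, List.foldl_cons]
      by_cases hq : q x = true
      · rw [if_pos hq, List.foldl_cons, ← ih (PySem.Set.add s x), pv_filter_add, if_pos hq]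
      · rw [if_neg hq, ← ih (PySem.Set.add s x), pv_filter_add, if_neg hq]

theorem pv_ofList_filter (q : String → Bool) (l : List String) :
    PySem.Set.ofList (l.filter q) = (PySem.Set.ofList l).filter q := by
  rw [PySem.Set.ofList_eq_foldl, PySem.Set.ofList_eq_foldl]
  have h := pv_foldl_add_filter q l []
  simpa using h

theorem pv_getD_foldl_insert_const {nu : Type} (c : nu) :
    ∀ (l : List String) (d : PySem.Dict String nu), (∀ w, d.getD w c = c) →
      ∀ w, (l.foldl (fun d x => d.insert x c) d).getD w c = c := by
  intro l
  induction l with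
  | nil => intro d h w; simpa using h w
  | cons x t ih =>
      intro d h w
      simp only [List.foldl_cons]
      refine ih _ (fun w' => ?_) w
      rw [PySem.Dict.getD_insert]
      split
      · rfl
      · exact h w'

theorem pv_keys_modify_mem {nu : Type} (d : PySem.Dict String nu) (k : String) (d0 : nu)
    (f : nu → nu) (h : k ∈ d.keys) : (d.modify k d0 f).keys = d.keys := by
  rw [PySem.Dict.keys_modify]
  exact PySem.Dict.keys_insert_of_contains d _ ((PySem.Dict.contains_iff_mem_keys d k).2 h)

-- ---------- A side ----------

theorem pv_getD_foldl_modify_add (m : String) :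
    ∀ (l : List String) (d : PySem.Dict String (PySem.Set String)) (w : String),
      ((l.foldl (fun d pal => d.modify m PySem.Set.empty (fun s => PySem.Set.add s pal)) d).getD w
          PySem.Set.empty)
        = if w = m then l.foldl PySem.Set.add (d.getD m PySem.Set.empty)
          else d.getD w PySem.Set.empty := by
  intro l
  induction l with
  | nil =>
      intro d w
      simp only [List.foldl_nil]
      by_cases hw : w = m
      · rw [if_pos hw, hw]
      · rw [if_neg hw]
  | cons x t ih =>
      intro d w
      simp only [List.foldl_cons]
      rw [ih]
      by_cases hw : w = m
      · subst hw
        rw [if_pos rfl, if_pos rfl, PySem.Dict.getD_modify, if_pos rfl]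
      · rw [if_neg hw, if_neg hw, PySem.Dict.getD_modify, if_neg hw]

theorem pv_keys_foldl_modify_add (m : String) :
    ∀ (l : List String) (d : PySem.Dict String (PySem.Set String)), m ∈ d.keys →
      ((l.foldl (fun d pal => d.modify m PySem.Set.empty (fun s => PySem.Set.add s pal)) d).keys)
        = d.keys := by
  intro l
  induction l with
  | nil => intro d _; rfl
  | cons x t ih =>
      intro d h
      simp only [List.foldl_cons]
      rw [ih _ (by rw [pv_keys_modify_mem d m _ _ h]; exact h), pv_keys_modify_mem d m _ _ h]

theorem pv_prefix_iff (m p : List Char) (h : m.length ≤ p.length) :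
    (m <+: p) ↔ ∀ k, k < m.length → p[k]? = m[k]? := by
  constructor
  · intro hpre k hk
    obtain ⟨t, rfl⟩ := hpre
    rw [List.getElem?_append_left hk]
  · intro hall
    rw [List.prefix_iff_eq_take]
    refine List.ext_getElem (by simp [Nat.min_eq_left h]) ?_
    intro i h1 h2
    have hi : i < m.length := h1
    have h3 := hall i hi
    rw [List.getElem?_eq_getElem (by omega : i < p.length),
      List.getElem?_eq_getElem (by omega : i < m.length)] at h3
    simp [List.getElem_take]
    exact (Option.some_inj.1 h3).symm

-- the character-counting loop of A recognises exactly "main is a prefix of pal"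
theorem pv_counter (main pal : String) :
    (((PySem.List.pyRange 0 (min (PySem.Str.len main) (PySem.Str.len pal)) 1).foldl
        (fun counter i =>
          if PySem.Str.pyGet? pal i == PySem.Str.pyGet? main i then counter + 1 else counter)
        (0 : Int)) == PySem.Str.len main)
      = decide (main.toList <+: pal.toList) := by
  rw [PySem.List.foldl_if_add_one (fun i => PySem.Str.pyGet? pal i == PySem.Str.pyGet? main i)]
  set m := main.toList with hm
  set p := pal.toList with hp
  have hlm : PySem.Str.len main = (m.length : Int) := rfl
  have hlp : PySem.Str.len pal = (p.length : Int) := rfl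
  rw [hlm, hlp, PySem.List.pyRange_one, List.countP_map]
  have h1 : ((min (m.length : Int) (p.length : Int)) - 0).toNat = min m.length p.length := by
    rw [← Nat.cast_min]; omega
  rw [h1]
  have hcp : List.countP ((fun i => PySem.Str.pyGet? pal i == PySem.Str.pyGet? main i) ∘
        (fun k : Nat => (0 : Int) + (k : Int))) (List.range (min m.length p.length))
      = List.countP (fun k : Nat => p[k]? == m[k]?) (List.range (min m.length p.length)) := by
    refine List.countP_congr ?_
    intro k _
    simp only [Function.comp, zero_add, PySem.Str.pyGet?, PySem.Chars.pyGet?_eq_listPyGet?,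
      PySem.List.pyGet?_natCast]
    exact Iff.rfl
  rw [hcp]
  by_cases hMP : m.length ≤ p.length
  · have hmin : min m.length p.length = m.length := Nat.min_eq_left hMP
    rw [hmin]
    by_cases hpre : m <+: p
    · have hall : ∀ k ∈ List.range m.length, (fun k : Nat => p[k]? == m[k]?) k = true := by
        intro k hk
        simp only [List.mem_range] at hk
        simp [(pv_prefix_iff m p hMP).1 hpre k hk]
      have hc : List.countP (fun k : Nat => p[k]? == m[k]?) (List.range m.length)
          = m.length := by
        rw [List.countP_eq_length.2 hall, List.length_range]
      rw [hc]
      simp [hpre]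
    · have hc : List.countP (fun k : Nat => p[k]? == m[k]?) (List.range m.length)
          ≠ m.length := by
        intro hc
        apply hpre
        refine (pv_prefix_iff m p hMP).2 ?_
        intro k hk
        have h4 := List.countP_eq_length.1 (by rw [hc, List.length_range]) k (List.mem_range.2 hk)
        simpa using h4
      simp [hpre]
      omega
  · have hle : List.countP (fun k : Nat => p[k]? == m[k]?) (List.range (min m.length p.length))
        ≤ p.length := by
      calc _ ≤ (List.range (min m.length p.length)).length := List.countP_le_length
      _ = min m.length p.length := List.length_range
      _ ≤ p.length := Nat.min_le_right _ _
    have hnp : ¬ (m <+: p) := fun h => absurd h.length_le (by omega)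
    simp [hnp]
    omega

-- A's inner loop, rewritten as a fold over the words satisfying pvCond
theorem pv_innerA (palavras : List String) (main : String)
    (res : PySem.Dict String (PySem.Set String)) :
    (palavras.foldl (fun res pal =>
      if pal ≠ main then
        let mainLen : Int := PySem.Str.len main
        let counter : Int :=
          (PySem.List.pyRange 0 (min mainLen (PySem.Str.len pal)) 1).foldl
            (fun counter i =>
              if PySem.Str.pyGet? pal i == PySem.Str.pyGet? main i then counter + 1 else counter) 0
        if counter == mainLen then res.modify main PySem.Set.empty (fun s => PySem.Set.add s pal)
        else res
      else res) res)
    = (palavras.filter (pvCond main)).foldl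
        (fun res pal => res.modify main PySem.Set.empty (fun s => PySem.Set.add s pal)) res := by
  have hfun : (fun (res : PySem.Dict String (PySem.Set String)) pal =>
      if pal ≠ main then
        let mainLen : Int := PySem.Str.len main
        let counter : Int :=
          (PySem.List.pyRange 0 (min mainLen (PySem.Str.len pal)) 1).foldl
            (fun counter i =>
              if PySem.Str.pyGet? pal i == PySem.Str.pyGet? main i then counter + 1 else counter) 0
        if counter == mainLen then res.modify main PySem.Set.empty (fun s => PySem.Set.add s pal)
        else res
      else res)
      = (fun res pal => if pvCond main pal = true then
          res.modify main PySem.Set.empty (fun s => PySem.Set.add s pal) else res) := by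
    funext res pal
    by_cases hne : pal = main
    · subst hne
      simp [pvCond]
    · rw [if_pos hne]
      show (if ((_ : Int) == PySem.Str.len main) = true then _ else _) = _
      rw [pv_counter]
      by_cases hpre : main.toList <+: pal.toList
      · simp [pvCond, hpre, hne]
      · simp [pvCond, hpre]
  rw [hfun, PySem.List.foldl_if_eq_foldl_filter]

theorem pv_outerA (palavras : List String) :
    ∀ (ms : List String), (∀ x ∈ ms, x ∈ palavras) →
    ∀ (S : List String) (d : PySem.Dict String (PySem.Set String)),
      d.keys = PySem.List.dedup palavras →
      (∀ w, d.getD w PySem.Set.empty = if w ∈ S then pvSpecL palavras w else []) →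
      ((ms.foldl (fun res main => (palavras.filter (pvCond main)).foldl
          (fun res pal => res.modify main PySem.Set.empty (fun s => PySem.Set.add s pal)) res)
          d).keys = PySem.List.dedup palavras
        ∧ ∀ w, (ms.foldl (fun res main => (palavras.filter (pvCond main)).foldl
            (fun res pal => res.modify main PySem.Set.empty (fun s => PySem.Set.add s pal)) res)
            d).getD w PySem.Set.empty = if w ∈ S ++ ms then pvSpecL palavras w else []) := by
  intro ms
  induction ms with
  | nil =>
      intro _ S d hk hg
      exact ⟨hk, by simpa using hg⟩
  | cons mn t ih =>
      intro hmem S d hk hg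
      simp only [List.foldl_cons]
      have hmnD : mn ∈ PySem.List.dedup palavras :=
        (PySem.List.mem_dedup _ _).2 (hmem mn (by simp))
      have hk1 : ((palavras.filter (pvCond mn)).foldl
          (fun res pal => res.modify mn PySem.Set.empty (fun s => PySem.Set.add s pal)) d).keys
          = PySem.List.dedup palavras := by
        rw [pv_keys_foldl_modify_add mn _ d (by rw [hk]; exact hmnD)]
        exact hk
      have hg1 : ∀ w, ((palavras.filter (pvCond mn)).foldl
          (fun res pal => res.modify mn PySem.Set.empty (fun s => PySem.Set.add s pal)) d).getD w
            PySem.Set.empty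
          = if w ∈ S ++ [mn] then pvSpecL palavras w else [] := by
        intro w
        rw [pv_getD_foldl_modify_add]
        by_cases hw : w = mn
        · subst hw
          rw [if_pos rfl, hg w]
          by_cases hS : w ∈ S
          · rw [if_pos hS, pv_foldl_add_absorb _ _ ?_, if_pos (by simp [hS])]
            intro x hx
            obtain ⟨hx1, hx2⟩ := List.mem_filter.1 hx
            exact List.mem_filter.2 ⟨(PySem.List.mem_dedup _ _).2 hx1, hx2⟩
          · rw [if_neg hS]
            have hfoldl : (palavras.filter (pvCond w)).foldl PySem.Set.add []
                = pvSpecL palavras w := by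
              have h5 := PySem.Set.ofList_eq_foldl (palavras.filter (pvCond w))
              rw [← h5, pv_ofList_filter]
              unfold pvSpecL
              rw [PySem.List.dedup_eq_ofList]
            rw [hfoldl, if_pos (by simp)]
        · rw [if_neg hw, hg w]
          by_cases hS : w ∈ S <;> simp [hS, hw]
      have hres := ih (fun x hx => hmem x (by simp [hx])) (S ++ [mn]) _ hk1 hg1
      refine ⟨hres.1, fun w => ?_⟩
      rw [hres.2 w, List.append_assoc]
      rfl

theorem pv_A (palavras : List String) : contencao palavras = pvCommon palavras := by
  show (pvRemoveSets (palavras.foldl (fun res main =>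
    palavras.foldl (fun res pal =>
      if pal ≠ main then
        let mainLen : Int := PySem.Str.len main
        let counter : Int :=
          (PySem.List.pyRange 0 (min mainLen (PySem.Str.len pal)) 1).foldl
            (fun counter i =>
              if PySem.Str.pyGet? pal i == PySem.Str.pyGet? main i then counter + 1 else counter) 0
        if counter == mainLen then res.modify main PySem.Set.empty (fun s => PySem.Set.add s pal)
        else res
      else res) res) (pvInit palavras))).items = pvCommon palavras
  have hstep : (palavras.foldl (fun res main =>
      palavras.foldl (fun res pal =>
        if pal ≠ main then
          let mainLen : Int := PySem.Str.len main
          let counter : Int :=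
            (PySem.List.pyRange 0 (min mainLen (PySem.Str.len pal)) 1).foldl
              (fun counter i =>
                if PySem.Str.pyGet? pal i == PySem.Str.pyGet? main i then counter + 1 else counter) 0
          if counter == mainLen then res.modify main PySem.Set.empty (fun s => PySem.Set.add s pal)
          else res
        else res) res) (pvInit palavras))
      = (palavras.foldl (fun res main => (palavras.filter (pvCond main)).foldl
          (fun res pal => res.modify main PySem.Set.empty (fun s => PySem.Set.add s pal)) res)
          (pvInit palavras)) := by
    apply PySem.List.foldl_congr_mem
    intro acc x _
    exact pv_innerA palavras x acc
  rw [hstep]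
  have hinit_keys : (pvInit palavras).keys = PySem.List.dedup palavras := by
    unfold pvInit
    rw [PySem.Dict.keys_foldl_insert palavras (fun _ _ => PySem.Set.empty) PySem.Dict.empty,
      PySem.Dict.keys_empty, PySem.List.dedup_eq_ofList]
    simp [PySem.Set.update, PySem.Set.ofList, PySem.Set.empty]
  have hinit_g : ∀ w, (pvInit palavras).getD w PySem.Set.empty = if w ∈ ([] : List String)
      then pvSpecL palavras w else [] := by
    intro w
    simp only [List.not_mem_nil, if_false]
    exact pv_getD_foldl_insert_const PySem.Set.empty palavras PySem.Dict.empty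
      (fun w' => PySem.Dict.getD_empty w' _) w
  obtain ⟨hkeys, hg⟩ := pv_outerA palavras palavras (fun x hx => hx) [] (pvInit palavras)
    hinit_keys hinit_g
  have hgetD : ∀ w ∈ PySem.List.dedup palavras,
      (palavras.foldl (fun res main => (palavras.filter (pvCond main)).foldl
        (fun res pal => res.modify main PySem.Set.empty (fun s => PySem.Set.add s pal)) res)
        (pvInit palavras)).getD w PySem.Set.empty = pvSpecL palavras w := by
    intro w hw
    rw [hg w, if_pos (by simpa using (PySem.List.mem_dedup palavras w).1 hw)]
  set R := palavras.foldl (fun res main => (palavras.filter (pvCond main)).foldl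
    (fun res pal => res.modify main PySem.Set.empty (fun s => PySem.Set.add s pal)) res)
    (pvInit palavras) with hR
  unfold pvRemoveSets
  rw [hkeys]
  rw [show (List.foldl (fun r p =>
      if (!(PySem.Set.equal (R.getD p PySem.Set.empty) PySem.Set.empty)) = true
      then r.insert p (R.getD p PySem.Set.empty) else r) PySem.Dict.empty
      (PySem.List.dedup palavras))
    = List.foldl (fun r p => r.insert p (R.getD p PySem.Set.empty)) PySem.Dict.empty
      ((PySem.List.dedup palavras).filter
        (fun p => !(PySem.Set.equal (R.getD p PySem.Set.empty) PySem.Set.empty)))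
    from PySem.List.foldl_if_eq_foldl_filter _ _ _ _]
  have hfilter : (PySem.List.dedup palavras).filter
      (fun p => !(PySem.Set.equal (R.getD p PySem.Set.empty) PySem.Set.empty))
      = (PySem.List.dedup palavras).filter (fun w => decide (pvSpecL palavras w ≠ [])) := by
    refine List.filter_congr ?_
    intro x hx
    rw [hgetD x hx, pv_not_equal_nil]
  rw [hfilter]
  rw [PySem.Dict.items_foldl_insert_fresh _ (fun p => p) (fun p => R.getD p PySem.Set.empty)
    PySem.Dict.empty (fun a _ => PySem.Dict.contains_empty a)
    (by simpa using List.Nodup.filter _ (PySem.List.nodup_dedup palavras))]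
  have hmap : ((PySem.List.dedup palavras).filter
        (fun w => decide (pvSpecL palavras w ≠ []))).map
        (fun p => (p, R.getD p PySem.Set.empty))
      = ((PySem.List.dedup palavras).filter
        (fun w => decide (pvSpecL palavras w ≠ []))).map (fun w => (w, pvSpecL palavras w)) := by
    refine List.map_congr_left ?_
    intro x hx
    rw [hgetD x (List.mem_filter.1 hx).1]
  rw [hmap]
  rfl

-- ---------- B side ----------

theorem pv_slice_take (pal : String) (k : Int) (hk : 0 ≤ k) :
    (PySem.Str.slice pal (some 0) (some k)).toList = pal.toList.take k.toNat := by
  simp [PySem.Str.slice]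
  exact PySem.List.slice_to _ hk

-- the inner filtered range of B: at most one k yields the prefix w
theorem pv_ks (D : List String) (pal w : String) :
    ((PySem.List.pyRange 0 (PySem.Str.len pal) 1).filter
      (fun k => (PySem.Str.slice pal (some 0) (some k) == w)
          && PySem.Set.contains (PySem.Set.ofList D) (PySem.Str.slice pal (some 0) (some k))))
    = if w ∈ D ∧ pvCond w pal = true then [PySem.Str.len w] else [] := by
  by_cases h : w ∈ D ∧ pvCond w pal = true
  · obtain ⟨hD, hcond⟩ := h
    have hcond' : w.toList <+: pal.toList ∧ pal ≠ w := by
      simpa [pvCond] using hcond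
    have hlt : w.toList.length < pal.toList.length := by
      rcases Nat.lt_or_ge w.toList.length pal.toList.length with h1 | h1
      · exact h1
      · exfalso
        have hle := hcond'.1.length_le
        have hEq : w.toList = pal.toList :=
          List.IsPrefix.eq_of_length hcond'.1 (by omega)
        exact hcond'.2 (String.toList_inj.1 hEq.symm)
    have hlw : PySem.Str.len w = (w.toList.length : Int) := rfl
    have hlp : PySem.Str.len pal = (pal.toList.length : Int) := rfl
    have hpt : ∀ k ∈ PySem.List.pyRange 0 (PySem.Str.len pal) 1,
        ((PySem.Str.slice pal (some 0) (some k) == w)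
          && PySem.Set.contains (PySem.Set.ofList D) (PySem.Str.slice pal (some 0) (some k)))
        = (k == PySem.Str.len w) := by
      intro k hk
      obtain ⟨hk0, hkP⟩ := PySem.List.mem_pyRange_one.1 hk
      by_cases hkM : k = PySem.Str.len w
      · subst hkM
        have hsl : PySem.Str.slice pal (some 0) (some (PySem.Str.len w)) = w := by
          refine String.toList_inj.1 ?_
          rw [pv_slice_take pal _ (by rw [hlw]; omega)]
          have h6 : (PySem.Str.len w).toNat = w.toList.length := by rw [hlw]; omega
          rw [h6]
          exact (List.prefix_iff_eq_take.1 hcond'.1).symm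
        have hmem : w ∈ PySem.Set.ofList D := (PySem.Set.mem_ofList D w).2 hD
        rw [hsl]
        simp [PySem.Set.contains, List.contains_eq_mem, hmem]
      · have hsl : ¬ (PySem.Str.slice pal (some 0) (some k) = w) := by
          intro hEq
          apply hkM
          have h7 : pal.toList.take k.toNat = w.toList := by
            rw [← pv_slice_take pal k hk0, hEq]
          have h8 : min k.toNat pal.toList.length = w.toList.length := by
            rw [← List.length_take, h7]
          rw [hlp] at hkP
          rw [hlw]
          omega
        have h2 : (k == PySem.Str.len w) = false := beq_eq_false_iff_ne.2 hkM
        rw [h2]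
        simp [beq_iff_eq, hsl]
    rw [List.filter_congr hpt, List.filter_beq (PySem.Str.len w),
      List.count_eq_one_of_mem (PySem.List.nodup_pyRange_one _ _) ?_, if_pos ⟨hD, hcond⟩,
      List.replicate_one]
    refine PySem.List.mem_pyRange_one.2 ⟨by rw [hlw]; omega, by rw [hlw, hlp]; omega⟩
  · rw [if_neg h, List.filter_eq_nil_iff.2 ?_]
    intro k hk hp
    obtain ⟨hk0, hkP⟩ := PySem.List.mem_pyRange_one.1 hk
    rw [Bool.and_eq_true] at hp
    obtain ⟨hp1, hp2⟩ := hp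
    have hsl : PySem.Str.slice pal (some 0) (some k) = w := by simpa using hp1
    have hD : w ∈ D := by
      have h10 := hp2
      rw [hsl] at h10
      simpa [PySem.Set.contains] using (PySem.Set.mem_ofList D w).1 (by
        simpa [PySem.Set.contains, List.contains_eq_mem] using h10)
    have h7 : pal.toList.take k.toNat = w.toList := by
      rw [← pv_slice_take pal k hk0, hsl]
    have hkP' : k.toNat < pal.toList.length := by
      have : PySem.Str.len pal = (pal.toList.length : Int) := rfl
      omega
    have hpre : w.toList <+: pal.toList := by
      rw [← h7]; exact List.take_prefix _ _
    have hlen : w.toList.length = k.toNat := by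
      have h8 : (pal.toList.take k.toNat).length = w.toList.length := by rw [h7]
      rw [List.length_take] at h8
      omega
    have hne : pal ≠ w := by
      intro hEq
      rw [hEq] at hkP'
      omega
    exact h ⟨hD, by simp [pvCond, hpre, hne]⟩

theorem pv_keys_foldl_modify_key {beta : Type} (key : beta → String)
    (f : beta → List String → List String) :
    ∀ (l : List beta) (d : PySem.Dict String (List String)), (∀ x ∈ l, key x ∈ d.keys) →
      (l.foldl (fun d x => d.modify (key x) [] (f x)) d).keys = d.keys := by
  intro l
  induction l with
  | nil => intro d _; rfl
  | cons x t ih =>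
      intro d h
      simp only [List.foldl_cons]
      have hx : key x ∈ d.keys := h x (by simp)
      rw [ih _ (by
        rw [pv_keys_modify_mem d (key x) _ _ hx]
        exact fun y hy => h y (by simp [hy])), pv_keys_modify_mem d (key x) _ _ hx]

theorem pv_innerB_getD (D : List String) (pal : String) (d : PySem.Dict String (List String))
    (w : String) :
    ((PySem.List.pyRange 0 (PySem.Str.len pal) 1).foldl (fun d k =>
        if PySem.Set.contains (PySem.Set.ofList D) (PySem.Str.slice pal (some 0) (some k))
        then d.modify (PySem.Str.slice pal (some 0) (some k)) [] (fun l => l ++ [pal])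
        else d) d).getD w []
      = d.getD w [] ++ (if w ∈ D ∧ pvCond w pal = true then [pal] else []) := by
  rw [show (List.foldl (fun d k =>
      if PySem.Set.contains (PySem.Set.ofList D) (PySem.Str.slice pal (some 0) (some k))
      then d.modify (PySem.Str.slice pal (some 0) (some k)) [] (fun l => l ++ [pal]) else d) d
      (PySem.List.pyRange 0 (PySem.Str.len pal) 1))
    = List.foldl (fun d k =>
        d.modify (PySem.Str.slice pal (some 0) (some k)) [] (fun l => l ++ [pal])) d
      ((PySem.List.pyRange 0 (PySem.Str.len pal) 1).filter
        (fun k => PySem.Set.contains (PySem.Set.ofList D) (PySem.Str.slice pal (some 0) (some k))))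
    from PySem.List.foldl_if_eq_foldl_filter _ _ _ _]
  have hfm : List.foldl (fun (d : PySem.Dict String (List String)) (k : Int) =>
        d.modify (PySem.Str.slice pal (some 0) (some k)) [] (fun l => l ++ [pal])) d
        ((PySem.List.pyRange 0 (PySem.Str.len pal) 1).filter
          (fun k => PySem.Set.contains (PySem.Set.ofList D) (PySem.Str.slice pal (some 0) (some k))))
      = List.foldl (fun (d : PySem.Dict String (List String)) (p : String × String) =>
          d.modify p.1 [] (fun x => x ++ [p.2])) d
        (((PySem.List.pyRange 0 (PySem.Str.len pal) 1).filter
          (fun k => PySem.Set.contains (PySem.Set.ofList D)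
            (PySem.Str.slice pal (some 0) (some k)))).map
          (fun k : Int => (PySem.Str.slice pal (some 0) (some k), pal))) :=
    (List.foldl_map (f := fun k : Int => (PySem.Str.slice pal (some 0) (some k), pal))
      (g := fun (d : PySem.Dict String (List String)) (p : String × String) =>
        d.modify p.1 [] (fun x => x ++ [p.2]))).symm
  rw [hfm]
  rw [PySem.Dict.getD_foldl_modify_append]
  congr 1
  rw [List.filter_map, List.filter_filter]
  have hcomp : (fun a => ((fun p : String × String => p.1 == w) ∘
        (fun k : Int => (PySem.Str.slice pal (some 0) (some k), pal))) a
        && PySem.Set.contains (PySem.Set.ofList D) (PySem.Str.slice pal (some 0) (some a)))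
      = (fun k : Int => (PySem.Str.slice pal (some 0) (some k) == w)
          && PySem.Set.contains (PySem.Set.ofList D) (PySem.Str.slice pal (some 0) (some k))) := by
    funext a
    rfl
  rw [hcomp, pv_ks D pal w]
  by_cases h : w ∈ D ∧ pvCond w pal = true
  · rw [if_pos h, if_pos h]
    rfl
  · rw [if_neg h, if_neg h]
    rfl

theorem pv_innerB_keys (D : List String) (pal : String) (d : PySem.Dict String (List String))
    (hk : d.keys = D) :
    ((PySem.List.pyRange 0 (PySem.Str.len pal) 1).foldl (fun d k =>
        if PySem.Set.contains (PySem.Set.ofList D) (PySem.Str.slice pal (some 0) (some k))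
        then d.modify (PySem.Str.slice pal (some 0) (some k)) [] (fun l => l ++ [pal])
        else d) d).keys = D := by
  rw [show (List.foldl (fun d k =>
      if PySem.Set.contains (PySem.Set.ofList D) (PySem.Str.slice pal (some 0) (some k))
      then d.modify (PySem.Str.slice pal (some 0) (some k)) [] (fun l => l ++ [pal]) else d) d
      (PySem.List.pyRange 0 (PySem.Str.len pal) 1))
    = List.foldl (fun d k =>
        d.modify (PySem.Str.slice pal (some 0) (some k)) [] (fun l => l ++ [pal])) d
      ((PySem.List.pyRange 0 (PySem.Str.len pal) 1).filter
        (fun k => PySem.Set.contains (PySem.Set.ofList D) (PySem.Str.slice pal (some 0) (some k))))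
    from PySem.List.foldl_if_eq_foldl_filter _ _ _ _]
  rw [pv_keys_foldl_modify_key (fun k : Int => PySem.Str.slice pal (some 0) (some k))
    (fun _ l => l ++ [pal]) _ d ?_]
  · exact hk
  · intro x hx
    have hc := (List.mem_filter.1 hx).2
    rw [hk]
    exact (PySem.Set.mem_ofList D _).1 (by
      simpa [PySem.Set.contains, List.contains_eq_mem] using hc)

theorem pv_outerB (palavras : List String) :
    ∀ (ps : List String) (acc : PySem.Dict String (List String)),
      acc.keys = PySem.List.dedup palavras →
      ((ps.foldl (fun d pal =>
          (PySem.List.pyRange 0 (PySem.Str.len pal) 1).foldl (fun d k =>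
            if PySem.Set.contains (PySem.Set.ofList (PySem.List.dedup palavras))
                (PySem.Str.slice pal (some 0) (some k))
            then d.modify (PySem.Str.slice pal (some 0) (some k)) [] (fun l => l ++ [pal])
            else d) d) acc).keys = PySem.List.dedup palavras
        ∧ ∀ w, (ps.foldl (fun d pal =>
            (PySem.List.pyRange 0 (PySem.Str.len pal) 1).foldl (fun d k =>
              if PySem.Set.contains (PySem.Set.ofList (PySem.List.dedup palavras))
                  (PySem.Str.slice pal (some 0) (some k))
              then d.modify (PySem.Str.slice pal (some 0) (some k)) [] (fun l => l ++ [pal])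
              else d) d) acc).getD w []
          = acc.getD w [] ++ ps.filter
              (fun p => decide (w ∈ PySem.List.dedup palavras) && pvCond w p)) := by
  intro ps
  induction ps with
  | nil =>
      intro acc hk
      exact ⟨hk, fun w => by simp⟩
  | cons pal t ih =>
      intro acc hk
      simp only [List.foldl_cons]
      have hk1 := pv_innerB_keys (PySem.List.dedup palavras) pal acc hk
      obtain ⟨hkr, hgr⟩ := ih _ hk1
      refine ⟨hkr, fun w => ?_⟩
      rw [hgr w, pv_innerB_getD, List.append_assoc]
      congr 1
      rw [List.filter_cons]
      by_cases h : w ∈ PySem.List.dedup palavras ∧ pvCond w pal = true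
      · rw [if_pos h, if_pos (by simp [h.2, (PySem.List.mem_dedup palavras w).1 h.1])]
        rfl
      · rw [if_neg h, if_neg (by
          intro hb
          rw [Bool.and_eq_true, decide_eq_true_eq] at hb
          exact h hb)]
        rfl

theorem pv_B (palavras : List String) : contencao_alt palavras = pvCommon palavras := by
  show ((((PySem.List.dedup palavras).foldl (fun d pal =>
      (PySem.List.pyRange 0 (PySem.Str.len pal) 1).foldl (fun d k =>
        if PySem.Set.contains (PySem.Set.ofList (PySem.List.dedup palavras))
            (PySem.Str.slice pal (some 0) (some k))
        then d.modify (PySem.Str.slice pal (some 0) (some k)) [] (fun l => l ++ [pal])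
        else d) d)
      ((PySem.List.dedup palavras).foldl (fun d w => d.insert w []) PySem.Dict.empty)).items.foldl
      (fun r wl => if wl.2 ≠ [] then r.insert wl.1 (PySem.Set.ofList wl.2) else r)
      (PySem.Dict.empty : PySem.Dict String (PySem.Set String))).items) = pvCommon palavras
  have hDnd : (PySem.List.dedup palavras).Nodup := PySem.List.nodup_dedup palavras
  have hk0 : ((PySem.List.dedup palavras).foldl (fun d w => d.insert w [])
      (PySem.Dict.empty : PySem.Dict String (List String))).keys = PySem.List.dedup palavras := by
    rw [PySem.Dict.keys_foldl_insert (PySem.List.dedup palavras) (fun _ _ => [])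
      PySem.Dict.empty, PySem.Dict.keys_empty]
    have h1 : PySem.Set.update ([] : PySem.Set String) (PySem.List.dedup palavras)
        = PySem.Set.ofList (PySem.List.dedup palavras) := by
      simp [PySem.Set.update, PySem.Set.ofList, PySem.Set.empty]
    rw [h1]
    exact PySem.Set.ofList_eq_self_of_nodup _ hDnd
  have hg0 : ∀ w, ((PySem.List.dedup palavras).foldl (fun d w => d.insert w [])
      (PySem.Dict.empty : PySem.Dict String (List String))).getD w [] = [] :=
    pv_getD_foldl_insert_const [] (PySem.List.dedup palavras) PySem.Dict.empty
      (fun w' => PySem.Dict.getD_empty w' _)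
  obtain ⟨hkeys, hg⟩ := pv_outerB palavras (PySem.List.dedup palavras) _ hk0
  set C := (PySem.List.dedup palavras).foldl (fun d pal =>
      (PySem.List.pyRange 0 (PySem.Str.len pal) 1).foldl (fun d k =>
        if PySem.Set.contains (PySem.Set.ofList (PySem.List.dedup palavras))
            (PySem.Str.slice pal (some 0) (some k))
        then d.modify (PySem.Str.slice pal (some 0) (some k)) [] (fun l => l ++ [pal])
        else d) d)
      ((PySem.List.dedup palavras).foldl (fun d w => d.insert w []) PySem.Dict.empty) with hC
  have hgetD : ∀ w ∈ PySem.List.dedup palavras, C.getD w [] = pvSpecL palavras w := by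
    intro w hw
    rw [hg w, hg0 w, List.nil_append]
    unfold pvSpecL
    refine List.filter_congr ?_
    intro x _
    simp [(PySem.List.mem_dedup palavras w).1 hw]
  have hitems : C.items = (PySem.List.dedup palavras).map (fun w => (w, pvSpecL palavras w)) := by
    rw [PySem.Dict.items_eq_map_keys C (by rw [hkeys]; exact hDnd) [], hkeys]
    exact List.map_congr_left (fun w hw => by rw [hgetD w hw])
  rw [hitems]
  rw [show (List.foldl (fun (r : PySem.Dict String (PySem.Set String)) (wl : String × List String) =>
      if wl.2 ≠ [] then r.insert wl.1 (PySem.Set.ofList wl.2) else r) PySem.Dict.empty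
      ((PySem.List.dedup palavras).map (fun w => (w, pvSpecL palavras w))))
    = List.foldl (fun (r : PySem.Dict String (PySem.Set String)) (wl : String × List String) =>
        r.insert wl.1 (PySem.Set.ofList wl.2)) PySem.Dict.empty
      (((PySem.List.dedup palavras).map (fun w => (w, pvSpecL palavras w))).filter
        (fun wl => decide (wl.2 ≠ [])))
    from PySem.List.foldl_ite_eq_foldl_filter _ _ _ _]
  rw [List.filter_map]
  have hcomp2 : ((fun wl : String × List String => decide (wl.2 ≠ [])) ∘
      (fun w => (w, pvSpecL palavras w))) = (fun w => decide (pvSpecL palavras w ≠ [])) := by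
    funext a
    rfl
  rw [hcomp2]
  rw [List.foldl_map]
  rw [PySem.Dict.items_foldl_insert_fresh _ (fun w : String => w)
    (fun w => PySem.Set.ofList (pvSpecL palavras w)) PySem.Dict.empty
    (fun a _ => PySem.Dict.contains_empty a)
    (by simpa using List.Nodup.filter _ hDnd)]
  have hmap2 : ((PySem.List.dedup palavras).filter
        (fun w => decide (pvSpecL palavras w ≠ []))).map
        (fun w => (w, PySem.Set.ofList (pvSpecL palavras w)))
      = ((PySem.List.dedup palavras).filter
        (fun w => decide (pvSpecL palavras w ≠ []))).map (fun w => (w, pvSpecL palavras w)) := by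
    refine List.map_congr_left ?_
    intro x _
    have hnd2 : (pvSpecL palavras x).Nodup := List.Nodup.filter _ hDnd
    rw [PySem.Set.ofList_eq_self_of_nodup _ hnd2]
  rw [hmap2]
  rfl

-- ===== VERDICT (by name: the statement is the Claim_ definition above) =====
theorem contencao_spec : Claim_equal_contencao := by
  intro palavras _
  unfold Spec_contencao
  rw [pv_A, pv_B]
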